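-- pv_equiv track=rewrite | github.com/RutujP/InformationRetrievalSystem- | Page Ranking/finalIRAssignment_3.py | get_documentfreq_query
-- ===== SOURCE A (Python) =====
-- from collections import Counter
--
-- def get_documentfreq_query(questions_dict):
--     df_query = {}
--     for x in questions_dict.keys():
--         d = {}
--
--         data = Counter(questions_dict[x])
--         for value in questions_dict[x]:
--             count = 0
--             for p in questions_dict.values():
--                 if value in p:
--                     count += 1
--
--             tf = data[value]
--             d.update({value : {"document_freq" : count,
--                                "tf" : tf,
--                                "collectionsize": len(questions_dict),
--                                "document_length" : len(questions_dict[x]),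
--                                "max_term_freq": data.most_common()[0][1]}})
--         df_query[x] = d
--     return df_query
-- ===== SOURCE B (Python) =====
-- def get_documentfreq_query(questions_dict):
--     # One pass over all documents builds term -> document-frequency, then O(1) lookups.
--     n = len(questions_dict)
--     df = {}
--     for toks in questions_dict.values():
--         for t in dict.fromkeys(toks):
--             df[t] = df.get(t, 0) + 1
--     result = {}
--     for x, toks in questions_dict.items():
--         counts = {}
--         for t in toks:
--             counts[t] = counts.get(t, 0) + 1
--         mx = max(counts.values(), default=0)
--         length = len(toks)
--         result[x] = {t: {"document_freq": df[t], "tf": c,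
--                          "collectionsize": n, "document_length": length,
--                          "max_term_freq": mx}
--                      for t, c in counts.items()}
--     return result
-- ===== Notes on version B (the rewrite author's own statement) =====
-- stated objective: faster
-- what changed: Replaces the per-term rescan of every document (membership test of each query term against every document list) with a term->document-frequency dict built in one pass over the documents, and the per-document max term frequency is computed once from the counts instead of sorting via most_common() for every term.
import Mathlib
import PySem

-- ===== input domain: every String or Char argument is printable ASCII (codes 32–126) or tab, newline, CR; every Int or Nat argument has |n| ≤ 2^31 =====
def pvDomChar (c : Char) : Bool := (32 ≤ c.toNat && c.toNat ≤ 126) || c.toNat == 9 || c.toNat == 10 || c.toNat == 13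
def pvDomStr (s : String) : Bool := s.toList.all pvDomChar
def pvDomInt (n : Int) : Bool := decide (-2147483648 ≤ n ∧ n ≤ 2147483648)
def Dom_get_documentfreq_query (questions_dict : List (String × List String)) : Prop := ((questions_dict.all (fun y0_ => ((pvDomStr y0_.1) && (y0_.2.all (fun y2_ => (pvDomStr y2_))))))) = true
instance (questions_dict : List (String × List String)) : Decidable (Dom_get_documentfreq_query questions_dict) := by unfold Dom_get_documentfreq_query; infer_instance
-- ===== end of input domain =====

-- B precomputes a term→document-frequency dict in one pass over the documents instead of
-- rescanning every document for every term of every query; same exact output.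

-- ===== PORT A =====
-- data.most_common()[0][1]; inside A's loop data is nonempty, so the [] default is unreachable
def pvMostCommonTop (data : PySem.Dict String Int) : Int :=
  match PySem.List.sorted data.items (fun p => p.2) true with
  | [] => 0
  | m :: _ => m.2

def get_documentfreq_query (questions_dict : List (String × List String)) : List (String × List (String × List (String × Int))) :=
  let qd : PySem.Dict String (List String) := PySem.Dict.ofList questions_dict
  let df_query : PySem.Dict String (List (String × List (String × Int))) :=
    qd.keys.foldl (fun df_query x =>
      let toks := qd.getD x []
      let data := PySem.Dict.counter toks
      let d : PySem.Dict String (List (String × Int)) :=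
        toks.foldl (fun d value =>
          let count : Int := qd.values.foldl (fun c p => if p.contains value then c + 1 else c) 0
          let tf := data.getD value 0
          d.insert value
            [("document_freq", count), ("tf", tf),
             ("collectionsize", (qd.size : Int)),
             ("document_length", (toks.length : Int)),
             ("max_term_freq", pvMostCommonTop data)]) PySem.Dict.empty
      df_query.insert x d.items) PySem.Dict.empty
  df_query.items

-- ===== PORT B =====
def get_documentfreq_query_alt (questions_dict : List (String × List String)) : List (String × List (String × List (String × Int))) :=
  let qd : PySem.Dict String (List String) := PySem.Dict.ofList questions_dict
  let n : Int := qd.size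
  let df : PySem.Dict String Int :=
    qd.values.foldl (fun df toks =>
      (PySem.List.dedup toks).foldl (fun df t => df.insert t (df.getD t 0 + 1)) df)
      PySem.Dict.empty
  qd.items.map (fun p =>
    let toks := p.2
    let counts : PySem.Dict String Int :=
      toks.foldl (fun c t => c.insert t (c.getD t 0 + 1)) PySem.Dict.empty
    let mx : Int := (PySem.List.max? counts.values (fun y => y)).getD 0
    (p.1, counts.items.map (fun q =>
      (q.1, [("document_freq", df.getD q.1 0), ("tf", q.2),
             ("collectionsize", n),
             ("document_length", (toks.length : Int)),
             ("max_term_freq", mx)]))))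

-- ===== PRECONDITION & SPEC =====
def Spec_get_documentfreq_query (questions_dict : List (String × List String)) (out : List (String × List (String × List (String × Int)))) : Prop := out = get_documentfreq_query_alt questions_dict
instance (questions_dict : List (String × List String)) (out : List (String × List (String × List (String × Int)))) : Decidable (Spec_get_documentfreq_query questions_dict out) := by unfold Spec_get_documentfreq_query; infer_instance

-- ===== CLAIM (what is proved, stated in full; the proofs are below) =====
def Claim_equal_get_documentfreq_query : Prop := ∀ (questions_dict : List (String × List String)), Dom_get_documentfreq_query questions_dict → Spec_get_documentfreq_query questions_dict (get_documentfreq_query questions_dict)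

-- ===== LEMMAS AND PROOFS =====

-- A's inner membership-count loop equals a countP
theorem pv_count_loop (vs : List (List String)) (t : String) (c : Int) :
    vs.foldl (fun c p => if p.contains t then c + 1 else c) c
      = c + (vs.countP (fun p => p.contains t) : Int) := by
  induction vs generalizing c with
  | nil => simp
  | cons v vs ih =>
      simp only [List.foldl_cons, List.countP_cons, ih]
      by_cases h : t ∈ v <;> simp [h] <;> omega

-- B's df-building double fold: lookup = number of documents containing t
theorem pv_df_getD (vs : List (List String)) (d : PySem.Dict String Int) (t : String) :
    ((vs.foldl (fun df toks =>
        (PySem.List.dedup toks).foldl (fun df t => df.insert t (df.getD t 0 + 1)) df) d).getD t 0)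
      = d.getD t 0 + (vs.countP (fun p => p.contains t) : Int) := by
  induction vs generalizing d with
  | nil => simp
  | cons v vs ih =>
      simp only [List.foldl_cons, List.countP_cons, ih,
        PySem.Dict.getD_foldl_insert_add_one]
      have hc : ((PySem.List.dedup v).count t : Int) = if t ∈ v then 1 else 0 := by
        by_cases h : t ∈ v
        · rw [List.count_eq_one_of_mem (PySem.List.nodup_dedup v)
            ((PySem.List.mem_dedup v t).2 h)]
          simp [h]
        · rw [List.count_eq_zero_of_not_mem (fun hm => h ((PySem.List.mem_dedup v t).1 hm))]
          simp [h]
      rw [hc]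
      by_cases h : t ∈ v <;> simp [h] <;> omega

-- getD through a foldl of inserts whose value depends only on the key
theorem pv_getD_foldl_insert_keyfun (f : String → List (String × Int)) (toks : List String)
    (d : PySem.Dict String (List (String × Int))) (k : String) :
    ((toks.foldl (fun d t => d.insert t (f t)) d).getD k [])
      = if k ∈ toks then f k else d.getD k [] := by
  induction toks generalizing d with
  | nil => simp
  | cons t toks ih =>
      simp only [List.foldl_cons, ih, PySem.Dict.getD_insert, List.mem_cons]
      by_cases h1 : k ∈ toks <;> by_cases h2 : k = t <;> simp [h1, h2]

-- items of a foldl of inserts whose value depends only on the key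
theorem pv_items_foldl_insert_keyfun (f : String → List (String × Int)) (toks : List String) :
    (toks.foldl (fun d t => d.insert t (f t))
        (PySem.Dict.empty : PySem.Dict String (List (String × Int)))).items
      = (PySem.Set.ofList toks).map (fun t => (t, f t)) := by
  have hnd : (toks.foldl (fun d t => d.insert t (f t))
      (PySem.Dict.empty : PySem.Dict String (List (String × Int)))).keys.Nodup :=
    PySem.Dict.nodup_keys_foldl_insert toks (fun _ t => f t) _ (by simp)
  have hk : (toks.foldl (fun d t => d.insert t (f t))
      (PySem.Dict.empty : PySem.Dict String (List (String × Int)))).keys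
      = PySem.Set.ofList toks := by
    rw [PySem.Dict.keys_foldl_insert toks (fun _ t => f t)]
    simp [PySem.Set.update_nil_left]
  rw [PySem.Dict.items_eq_map_keys _ hnd [], hk]
  refine List.map_congr_left (fun k hkm => ?_)
  rw [pv_getD_foldl_insert_keyfun]
  simp [(PySem.Set.mem_ofList toks k).1 hkm]

-- the head of the reverse-sorted-by-count items equals max(values)
theorem pv_mostCommon_eq_max (data : PySem.Dict String Int) (h : data.items ≠ []) :
    pvMostCommonTop data = (PySem.List.max? data.values (fun y => y)).getD 0 := by
  unfold pvMostCommonTop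
  rcases hs : PySem.List.sorted data.items (fun p => p.2) true with _ | ⟨m, rest⟩
  · exact absurd ((PySem.List.sorted_eq_nil_iff _ _ _).1 hs) h
  · have hm : m ∈ data.items := by
      have := PySem.List.sorted_perm data.items (fun p => p.2) true
      rw [hs] at this
      exact this.mem_iff.1 (List.mem_cons_self ..)
    have hge := PySem.List.key_head_sorted_rev_ge data.items (fun p => p.2) hs
    rcases hx : PySem.List.max? data.values (fun y => y) with _ | mx
    · have hv : data.values = [] := (PySem.List.max?_eq_none_iff _ _).1 hx
      have : data.items = [] := by
        simpa [PySem.Dict.values, List.map_eq_nil_iff] using hv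
      exact absurd this h
    · have hmxmem : mx ∈ data.values := PySem.List.max?_mem hx
      have hmxmax := PySem.List.max?_isMax hx
      have h1 : m.2 ≤ mx := hmxmax m.2 (by
        simp only [PySem.Dict.values]
        exact List.mem_map.2 ⟨m, hm, rfl⟩)
      have h2 : mx ≤ m.2 := by
        obtain ⟨a, ha⟩ : ∃ a, (a, mx) ∈ data.items := by
          simpa [PySem.Dict.values] using hmxmem
        exact hge (a, mx) ha
      simp [le_antisymm h1 h2]

-- the two per-document inner results agree
theorem pv_inner_eq (qd : PySem.Dict String (List String)) (toks : List String) :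
    (toks.foldl (fun d value =>
        d.insert value
          [("document_freq",
              qd.values.foldl (fun c p => if p.contains value then c + 1 else c) 0),
           ("tf", (PySem.Dict.counter toks).getD value 0),
           ("collectionsize", (qd.size : Int)),
           ("document_length", (toks.length : Int)),
           ("max_term_freq", pvMostCommonTop (PySem.Dict.counter toks))])
      (PySem.Dict.empty : PySem.Dict String (List (String × Int)))).items
      = (toks.foldl (fun c t => c.insert t (c.getD t 0 + 1)) PySem.Dict.empty).items.map
          (fun q =>
            (q.1, [("document_freq",
                      (qd.values.foldl (fun df toks =>
                        (PySem.List.dedup toks).foldl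
                          (fun df t => df.insert t (df.getD t 0 + 1)) df)
                        PySem.Dict.empty).getD q.1 0),
                   ("tf", q.2),
                   ("collectionsize", (qd.size : Int)),
                   ("document_length", (toks.length : Int)),
                   ("max_term_freq",
                      (PySem.List.max? (toks.foldl (fun c t => c.insert t (c.getD t 0 + 1))
                          PySem.Dict.empty).values (fun y => y)).getD 0)])) := by
  simp only [PySem.Dict.foldl_insert_getD_add_one_eq_counter]
  rw [pv_items_foldl_insert_keyfun, PySem.Dict.items_counter, List.map_map]
  refine List.map_congr_left (fun t hmem => ?_)
  have ht : t ∈ toks := (PySem.Set.mem_ofList toks t).1 hmem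
  have hne : (PySem.Dict.counter toks).items ≠ [] := by
    rw [PySem.Dict.items_counter]
    exact List.ne_nil_of_mem (List.mem_map.2 ⟨t, hmem, rfl⟩)
  simp only [Function.comp]
  rw [pv_count_loop, pv_df_getD, PySem.Dict.getD_counter,
    pv_mostCommon_eq_max _ hne]
  simp

theorem pv_main (questions_dict : List (String × List String)) :
    get_documentfreq_query questions_dict = get_documentfreq_query_alt questions_dict := by
  simp only [get_documentfreq_query, get_documentfreq_query_alt]
  rw [PySem.Dict.items_foldl_insert_fresh _ (fun x => x) _ PySem.Dict.empty
      (fun a _ => by simp) (by simpa using PySem.Dict.nodup_keys_ofList (ν := List String) questions_dict)]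
  rw [PySem.Dict.items_eq_map_keys (PySem.Dict.ofList questions_dict)
      (PySem.Dict.nodup_keys_ofList questions_dict) [], List.map_map]
  simp only [show (PySem.Dict.empty : PySem.Dict String (List (String × List (String × Int)))).items = [] from rfl, List.nil_append]
  refine List.map_congr_left (fun x _ => ?_)
  simp only [Function.comp]
  exact congrArg (fun l => (x, l)) (pv_inner_eq (PySem.Dict.ofList questions_dict)
    (PySem.Dict.getD (PySem.Dict.ofList questions_dict) x []))

-- ===== VERDICT (by name: the statement is the Claim_ definition above) =====
theorem get_documentfreq_query_spec : Claim_equal_get_documentfreq_query := by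
  intro q _
  exact pv_main q
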